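-- pv_equiv track=rewrite | github.com/SSAFY-6th-SEOUL3/algorithm_study | programmers/기능개발/FallingStar624/s1.py | solution
-- ===== SOURCE A (Python) =====
-- import math
-- from collections import deque
--
-- def solution(progresses, speeds):
--     durations = deque()  # 작업별 남은 기간 정보를 저장하는 deque
--     progresses = list(map(lambda x: 100 - x, progresses))
--     for idx, speed in enumerate(speeds):
--         durations.append(math.ceil(progresses[idx]/speed))
--     answer = []
--     prerequisite = durations.popleft()
--     num = 1
--     #  deque를 사용하여 선행작업과 뒷 작업의 기간 비교
--     while durations:
--         current = durations.popleft()
--         if prerequisite >= current: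
--             num += 1
--             continue
--         else:
--             answer.append(num)
--             num = 1
--             prerequisite = current
--     else:
--         answer.append(num)
--
--     return answer
-- ===== SOURCE B (Python) =====
-- import math
--
-- def solution(progresses, speeds):
--     n = len(speeds)
--     dur = [math.ceil((100 - progresses[i]) / speeds[i]) for i in range(n)]
--     # index i opens a new deployment group iff its duration beats every earlier duration
--     starts = [i for i in range(n) if all(dur[j] < dur[i] for j in range(i))]
--     return [b - a for a, b in zip(starts, starts[1:] + [n])]
-- ===== Notes on version B (the rewrite author's own statement) =====
-- stated objective: alternative
-- what changed: Replaces A's single-pass deque-popping prerequisite/counter state machine by a brute-force boundary search: an index starts a deployment group iff its duration strictly beats every earlier duration (a short-circuiting scan over all earlier indices), and the answer is the list of differences of consecutive group-start indices.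
import Mathlib
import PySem

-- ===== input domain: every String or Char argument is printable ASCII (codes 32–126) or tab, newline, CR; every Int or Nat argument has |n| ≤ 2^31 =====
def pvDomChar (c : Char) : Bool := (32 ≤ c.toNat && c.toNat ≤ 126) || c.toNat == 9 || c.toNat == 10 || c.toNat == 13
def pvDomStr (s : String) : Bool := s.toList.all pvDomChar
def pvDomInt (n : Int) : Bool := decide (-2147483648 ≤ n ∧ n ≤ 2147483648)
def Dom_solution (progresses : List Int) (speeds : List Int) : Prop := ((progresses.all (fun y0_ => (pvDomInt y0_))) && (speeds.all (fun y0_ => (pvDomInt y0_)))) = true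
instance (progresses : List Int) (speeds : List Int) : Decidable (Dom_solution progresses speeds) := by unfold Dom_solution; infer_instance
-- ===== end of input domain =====

-- B replaces A's deque/counter state machine by a brute-force boundary search: an index starts a
-- deployment group iff its duration beats every earlier duration; the answer is the list of
-- differences of consecutive start indices (objective: alternative decomposition, not faster).
-- math.ceil(a/b) on ints with |a| ≤ 2^31+100, |b| ≤ 2^31 equals exact ceiling division -((-a)//b)
-- (the float quotient's error is < 1/|b| there, too small to cross an integer).

-- ===== PORT A =====
-- math.ceil(x/speed) as exact integer ceiling (see header); speed ≠ 0 required by Pre_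
def pyCeilDiv (a b : Int) : Int := -(PySem.Int.floordiv (-a) b)

-- the while-loop over the deque: state = (answer, prerequisite, num); final `else: answer.append(num)`
def solutionLoopA (ans : List Int) (pre num : Int) : List Int → List Int
  | [] => ans ++ [num]
  | c :: cs =>
      if pre ≥ c then solutionLoopA ans pre (num + 1) cs
      else solutionLoopA (ans ++ [num]) c 1 cs

def solution (progresses : List Int) (speeds : List Int) : List Int :=
  let progresses2 := progresses.map (fun x => 100 - x)
  -- for idx, speed in enumerate(speeds): durations.append(ceil(progresses2[idx]/speed))
  let durations := (PySem.List.enumerate speeds 0).foldl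
      (fun d p => d ++ [pyCeilDiv ((PySem.List.pyGet? progresses2 p.1).getD 0) p.2]) []
  match durations with
  | [] => []                      -- Python: durations.popleft() raises IndexError; excluded by Pre_
  | d :: rest => solutionLoopA [] d 1 rest

-- ===== PORT B =====
-- starts = [i for i in range(n) if all(dur[j] < dur[i] for j in range(i))]
def leadersB (n : Nat) (dur : List Int) : List Nat :=
  (List.range n).filter (fun i => (List.range i).all (fun j => decide (dur.getD j 0 < dur.getD i 0)))

-- [b - a for a, b in zip(starts, starts[1:] + [n])]
def diffsB (starts : List Nat) (n : Nat) : List Int :=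
  (starts.zip (starts.drop 1 ++ [n])).map (fun p => ((p.2 : Int) - (p.1 : Int)))

def solution_alt (progresses : List Int) (speeds : List Int) : List Int :=
  let n := speeds.length
  let dur := (List.range n).map (fun (i : Nat) =>
    pyCeilDiv (100 - (PySem.List.pyGet? progresses (i : Int)).getD 0)
      ((PySem.List.pyGet? speeds (i : Int)).getD 0))
  diffsB (leadersB n dur) n

-- ===== PRECONDITION & SPEC =====
-- Pre_ excludes exactly the inputs where A raises: empty speeds (popleft on empty deque),
-- speeds longer than progresses (IndexError), and a zero speed (ZeroDivisionError).
def Pre_solution (progresses : List Int) (speeds : List Int) : Prop :=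
  speeds ≠ [] ∧ speeds.length ≤ progresses.length ∧ ∀ s ∈ speeds, s ≠ 0
instance (progresses : List Int) (speeds : List Int) : Decidable (Pre_solution progresses speeds) := by
  unfold Pre_solution; infer_instance

def pvWitness_solution : List Int × List Int := ([93, 30, 55], [1, 30, 5])

def Spec_solution (progresses : List Int) (speeds : List Int) (out : List Int) : Prop := out = solution_alt progresses speeds
instance (progresses : List Int) (speeds : List Int) (out : List Int) : Decidable (Spec_solution progresses speeds out) := by unfold Spec_solution; infer_instance

-- ===== CLAIM (what is proved, stated in full; the proofs are below) =====
def Claim_equal_solution : Prop := ∀ (progresses : List Int) (speeds : List Int), Dom_solution progresses speeds → Pre_solution progresses speeds → Spec_solution progresses speeds (solution progresses speeds)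

-- ===== LEMMAS AND PROOFS =====

-- A's indexed duration build equals the zip-mapped duration build, generalized over a consumed prefix.
theorem enum_durations (g : Int → Int → Int) :
    ∀ (ss : List Int) (pre ps : List Int), ss.length ≤ ps.length →
      (PySem.List.enumerate ss (pre.length : Int)).map
        (fun p => g ((PySem.List.pyGet? (pre ++ ps) p.1).getD 0) p.2)
      = (ps.zip ss).map (fun p => g p.1 p.2) := by
  intro ss
  induction ss with
  | nil => intro pre ps _; simp [PySem.List.enumerate_nil]
  | cons s ss ih =>
    intro pre ps hlen
    cases ps with
    | nil => simp at hlen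
    | cons p ps' =>
      rw [PySem.List.enumerate_cons]
      simp only [List.map_cons, List.zip_cons_cons, PySem.List.pyGet?_append_length,
        Option.getD_some]
      have h1 : ((pre.length : Int) + 1) = (((pre ++ [p]).length : Int)) := by
        push_cast [List.length_append, List.length_cons, List.length_nil]; ring
      have h2 : pre ++ p :: ps' = (pre ++ [p]) ++ ps' := by simp
      rw [h1, h2, ih (pre ++ [p]) ps' (by simpa using hlen)]

-- factor the accumulator out of A's loop
theorem loopA_factor : ∀ (cs : List Int) (ans : List Int) (pre num : Int),
    solutionLoopA ans pre num cs = ans ++ solutionLoopA [] pre num cs := by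
  intro cs
  induction cs with
  | nil => intro ans pre num; simp [solutionLoopA]
  | cons c cs ih =>
    intro ans pre num
    by_cases h : pre ≥ c
    · simp only [solutionLoopA, if_pos h]; exact ih ans pre (num + 1)
    · simp only [solutionLoopA, if_neg h]
      rw [ih (ans ++ [num]) c 1, ih ([] ++ [num]) c 1]
      simp

-- consuming a prefix all of whose elements are ≤ pre just increments the counter
theorem loopA_consume : ∀ (r1 : List Int) (cs : List Int) (pre num : Int),
    (∀ x ∈ r1, x ≤ pre) →
    solutionLoopA [] pre num (r1 ++ cs) = solutionLoopA [] pre (num + r1.length) cs := by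
  intro r1
  induction r1 with
  | nil => intro cs pre num _; simp
  | cons a r1 ih =>
    intro cs pre num h
    have ha : pre ≥ a := h a (by simp)
    simp only [List.cons_append, solutionLoopA, if_pos ha]
    rw [ih cs pre (num + 1) (fun x hx => h x (by simp [hx]))]
    congr 1
    push_cast [List.length_cons]
    ring

-- the index-generator membership test of the port equals the prefix-slice test
def leadersT (n : Nat) (dur : List Int) : List Nat :=
  (List.range n).filter (fun i => (dur.take i).all (fun x => decide (x < dur.getD i 0)))

theorem leadersB_eq_leadersT (n : Nat) (dur : List Int) (h : n ≤ dur.length) :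
    leadersB n dur = leadersT n dur := by
  unfold leadersB leadersT
  apply List.filter_congr
  intro i hi
  rw [List.mem_range] at hi
  have hil : i ≤ dur.length := le_of_lt (lt_of_lt_of_le hi h)
  have htm : dur.take i = (List.range i).map (fun j => dur.getD j 0) := by
    apply List.ext_getElem
    · simp [Nat.min_eq_left hil]
    · intro j hj1 hj2
      have hji : j < i := by simpa using hj2
      have hjl : j < dur.length := lt_of_lt_of_le hji hil
      simp [List.getElem_take, List.getD_eq_getElem?_getD, List.getElem?_eq_getElem hjl]
  rw [htm, List.all_map]
  rfl

-- a filter over shifted indices is empty when the shifted predicate always fails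
theorem filter_map_succ_nil (len : Nat) (p : Nat → Bool) (h : ∀ j, j < len → p (j + 1) = false) :
    ((List.range len).map Nat.succ).filter p = [] := by
  rw [List.filter_map]
  have : (List.range len).filter (p ∘ Nat.succ) = [] := by
    rw [List.filter_eq_nil_iff]
    intro j hj
    rw [List.mem_range] at hj
    simp [Function.comp_apply, h j hj]
  rw [this, List.map_nil]

-- a filter over shifted indices is the shifted filter of the equivalent predicate
theorem filter_map_add (len m : Nat) (p : Nat → Bool) (q : Nat → Bool)
    (h : ∀ j, j < len → p (m + j) = q j) :
    ((List.range len).map (fun j => m + j)).filter p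
      = ((List.range len).filter q).map (fun j => m + j) := by
  rw [List.filter_map]
  congr 1
  apply List.filter_congr
  intro j hj
  rw [List.mem_range] at hj
  simp [Function.comp_apply, h j hj]

-- leaders of a list none of whose tail beats the head: only index 0
theorem leadersT_all_le (d : Int) (rest : List Int) (h : ∀ x ∈ rest, x ≤ d) :
    leadersT (d :: rest).length (d :: rest) = [0] := by
  unfold leadersT
  have hfirst := filter_map_succ_nil rest.length
    (fun i => ((d :: rest).take i).all (fun x => decide (x < (d :: rest).getD i 0)))
    (by
      intro j hj
      show ((d :: rest).take (j + 1)).all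
          (fun x => decide (x < (d :: rest).getD (j + 1) 0)) = false
      have hle : rest[j] ≤ d := h _ (List.getElem_mem hj)
      rw [List.take_succ_cons, List.getD_cons_succ, List.getD_eq_getElem rest 0 hj,
        List.all_cons, decide_eq_false (not_lt.mpr hle), Bool.false_and])
  rw [List.length_cons, List.range_succ_eq_map, List.filter_cons]
  simp only [List.take_zero, List.all_nil, if_pos]
  rw [hfirst]

-- every nonempty list has index 0 as its first leader
theorem leadersT_head (x : Int) (xs : List Int) :
    ∃ t, leadersT (x :: xs).length (x :: xs) = 0 :: t := by
  unfold leadersT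
  rw [List.length_cons, List.range_succ_eq_map, List.filter_cons]
  simp only [List.take_zero, List.all_nil, if_pos]
  exact ⟨_, rfl⟩

-- splitting at the first duration that beats the head: leaders = 0 :: shifted leaders of the suffix
theorem leadersT_split (d c : Int) (r1 r2 : List Int)
    (h1 : ∀ x ∈ r1, x ≤ d) (hc : d < c) :
    leadersT (d :: (r1 ++ c :: r2)).length (d :: (r1 ++ c :: r2))
      = 0 :: (leadersT (c :: r2).length (c :: r2)).map (fun j => (r1.length + 1) + j) := by
  unfold leadersT
  have hfirst := filter_map_succ_nil r1.length
    (fun i => ((d :: (r1 ++ c :: r2)).take i).all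
      (fun x => decide (x < (d :: (r1 ++ c :: r2)).getD i 0)))
    (by
      intro j hj
      show ((d :: (r1 ++ c :: r2)).take (j + 1)).all
          (fun x => decide (x < (d :: (r1 ++ c :: r2)).getD (j + 1) 0)) = false
      have hle : r1[j] ≤ d := h1 _ (List.getElem_mem hj)
      rw [List.take_succ_cons, List.getD_cons_succ, List.getD_append r1 (c :: r2) 0 j hj,
        List.getD_eq_getElem r1 0 hj, List.all_cons, decide_eq_false (not_lt.mpr hle),
        Bool.false_and])
  have hsec := filter_map_add (r2.length + 1) (r1.length + 1)
    (fun i => ((d :: (r1 ++ c :: r2)).take i).all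
      (fun x => decide (x < (d :: (r1 ++ c :: r2)).getD i 0)))
    (fun i => ((c :: r2).take i).all (fun x => decide (x < (c :: r2).getD i 0)))
    (by
      intro j hj
      show ((d :: (r1 ++ c :: r2)).take (r1.length + 1 + j)).all
          (fun x => decide (x < (d :: (r1 ++ c :: r2)).getD (r1.length + 1 + j) 0))
        = ((c :: r2).take j).all (fun x => decide (x < (c :: r2).getD j 0))
      have e : r1.length + 1 + j = (r1.length + j) + 1 := by omega
      rw [e]
      have hgd : (r1 ++ c :: r2).getD (r1.length + j) 0 = (c :: r2).getD j 0 := by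
        rw [List.getD_append_right r1 (c :: r2) 0 _ (Nat.le_add_right _ _),
          Nat.add_sub_cancel_left]
      rw [List.take_succ_cons, List.getD_cons_succ, hgd]
      have htk : (r1 ++ c :: r2).take (r1.length + j) = r1 ++ (c :: r2).take j := by
        rw [List.take_append, List.take_of_length_le (Nat.le_add_right _ _),
          Nat.add_sub_cancel_left]
      rw [htk, List.all_cons, List.all_append]
      cases hS : ((c :: r2).take j).all (fun x => decide (x < (c :: r2).getD j 0)) with
      | false => simp
      | true =>
        have hcv : c ≤ (c :: r2).getD j 0 := by
          cases j with
          | zero => simp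
          | succ j' =>
            rw [List.take_succ_cons, List.all_cons, Bool.and_eq_true, decide_eq_true_eq] at hS
            exact le_of_lt hS.1
        have hd : d < (c :: r2).getD j 0 := lt_of_lt_of_le hc hcv
        have hr : r1.all (fun x => decide (x < (c :: r2).getD j 0)) = true := by
          rw [List.all_eq_true]
          intro x hx
          exact decide_eq_true (lt_of_le_of_lt (h1 x hx) hd)
        rw [hr, decide_eq_true hd]
        rfl)
  simp only [List.length_cons, List.length_append]
  have hn : r1.length + (r2.length + 1) + 1 = (r1.length + 1) + (r2.length + 1) := by omega
  rw [hn, List.range_add, List.filter_append, hsec]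
  rw [List.range_succ_eq_map, List.filter_cons]
  simp only [List.take_zero, List.all_nil, if_pos]
  rw [hfirst]
  simp

-- peeling one group off the difference list
theorem diffsB_shift (m : Nat) (t : List Nat) (n : Nat) (hmn : m ≤ n) :
    diffsB (0 :: (0 :: t).map (fun j => m + j)) n = (m : Int) :: diffsB (0 :: t) (n - m) := by
  unfold diffsB
  simp only [List.map_cons, Nat.add_zero, List.drop_one, List.tail_cons, List.cons_append,
    List.zip_cons_cons, List.map_cons, Nat.cast_zero, sub_zero]
  have h2 : t.map (fun j => m + j) ++ [n] = (t ++ [n - m]).map (fun j => m + j) := by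
    rw [List.map_append]
    simp [Nat.add_sub_cancel' hmn]
  have h1 : (m :: t.map (fun j => m + j)) = (0 :: t).map (fun j => m + j) := by simp
  rw [h2, h1, List.zip_map, List.map_map]
  congr 1
  apply List.map_congr_left
  intro p _
  obtain ⟨a, b⟩ := p
  simp only [Function.comp_apply, Prod.map]
  push_cast
  ring

-- A's loop computes the leader-difference list
theorem mainM : ∀ (k : Nat) (d : Int) (rest : List Int), rest.length ≤ k →
    solutionLoopA [] d 1 rest = diffsB (leadersT (d :: rest).length (d :: rest)) (rest.length + 1) := by
  intro k
  induction k with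
  | zero =>
    intro d rest h
    have : rest = [] := List.eq_nil_of_length_eq_zero (Nat.le_zero.mp h)
    subst this
    simp [solutionLoopA, leadersT, diffsB, List.range_succ]
  | succ k ih =>
    intro d rest hk
    rcases hsplit : rest.dropWhile (fun x => decide (x ≤ d)) with _ | ⟨c, r2⟩
    · -- no later duration beats d: a single group
      have hall : ∀ x ∈ rest, x ≤ d := by
        intro x hx
        have htd := List.takeWhile_append_dropWhile (p := fun x => decide (x ≤ d)) (l := rest)
        rw [hsplit, List.append_nil] at htd
        have hx' : x ∈ rest.takeWhile (fun x => decide (x ≤ d)) := by rw [htd]; exact hx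
        simpa using List.mem_takeWhile_imp hx'
      rw [leadersT_all_le d rest hall]
      have hcons := loopA_consume rest [] d 1 hall
      rw [List.append_nil] at hcons
      rw [hcons]
      simp only [solutionLoopA, List.nil_append, diffsB, List.drop_one, List.tail_cons,
        List.zip_cons_cons, List.zip_nil_left, List.map_cons, List.map_nil, Nat.cast_zero,
        sub_zero]
      congr 1
      push_cast
      ring
    · -- rest = r1 ++ c :: r2 with r1 all ≤ d and d < c: first group has length r1.length + 1
      have hrest : rest = rest.takeWhile (fun x => decide (x ≤ d)) ++ c :: r2 := by
        rw [← hsplit, List.takeWhile_append_dropWhile]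
      set r1 := rest.takeWhile (fun x => decide (x ≤ d)) with hr1
      have hr1le : ∀ x ∈ r1, x ≤ d := fun x hx => by simpa using List.mem_takeWhile_imp hx
      have hcd : d < c := by
        have hh := List.head?_dropWhile_not (fun x => decide (x ≤ d)) rest
        rw [hsplit] at hh
        simpa using hh
      have hk2 : r2.length ≤ k := by
        have := congrArg List.length hrest
        simp only [List.length_append, List.length_cons] at this
        omega
      rw [hrest, loopA_consume r1 (c :: r2) d 1 hr1le]
      simp only [solutionLoopA, if_neg (not_le.mpr hcd), List.nil_append]
      rw [loopA_factor r2 [1 + (r1.length : Int)] c 1, ih c r2 hk2]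
      obtain ⟨t, ht⟩ := leadersT_head c r2
      rw [leadersT_split d c r1 r2 hr1le hcd, ht]
      have hnlen : (r1 ++ c :: r2).length + 1 = (r1.length + 1) + (r2.length + 1) := by
        simp [List.length_append]; omega
      rw [hnlen, diffsB_shift (r1.length + 1) t ((r1.length + 1) + (r2.length + 1))
        (Nat.le_add_right _ _), Nat.add_sub_cancel_left]
      simp only [List.singleton_append, List.cons.injEq]
      constructor
      · push_cast; ring
      · trivial

-- ===== VERDICT (by name: the statement is the Claim_ definition above) =====
theorem solution_spec : Claim_equal_solution := by
  intro progresses speeds _ hpre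
  obtain ⟨hne, hlen, -⟩ := hpre
  unfold Spec_solution
  show (let progresses2 := progresses.map (fun x => 100 - x);
        let durations := (PySem.List.enumerate speeds 0).foldl
          (fun d p => d ++ [pyCeilDiv ((PySem.List.pyGet? progresses2 p.1).getD 0) p.2]) [];
        match durations with
        | [] => []
        | d :: rest => solutionLoopA [] d 1 rest) = solution_alt progresses speeds
  simp only [solution_alt]
  rw [PySem.List.foldl_append_singleton_eq_map]
  rw [List.nil_append]
  have hlen2 : speeds.length ≤ (progresses.map (fun x => (100:Int) - x)).length := by
    simpa using hlen
  have hdur := enum_durations (fun a b => pyCeilDiv a b) speeds []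
    (progresses.map fun x => 100 - x) hlen2
  simp only [List.length_nil, Nat.cast_zero, List.nil_append] at hdur
  rw [hdur]
  have hz : ((progresses.map (fun x => (100:Int) - x)).zip speeds).map
      (fun p => pyCeilDiv p.1 p.2)
      = (progresses.zip speeds).map (fun p => pyCeilDiv (100 - p.1) p.2) := by
    simp [List.zip_map_left]
  rw [hz]
  have hDlen : ((progresses.zip speeds).map (fun p => pyCeilDiv (100 - p.1) p.2)).length
      = speeds.length := by
    simp [List.length_zip]; omega
  have hBdur : (List.range speeds.length).map (fun (i : Nat) =>
      pyCeilDiv (100 - (PySem.List.pyGet? progresses (i : Int)).getD 0)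
        ((PySem.List.pyGet? speeds (i : Int)).getD 0))
      = (progresses.zip speeds).map (fun p => pyCeilDiv (100 - p.1) p.2) := by
    apply List.ext_getElem
    · simp [hDlen]
    · intro i h1 h2
      have his : i < speeds.length := by simpa using h1
      have hip : i < progresses.length := lt_of_lt_of_le his hlen
      simp only [List.getElem_map, List.getElem_range, List.getElem_zip,
        PySem.List.pyGet?_natCast, List.getElem?_eq_getElem his, List.getElem?_eq_getElem hip,
        Option.getD_some]
  rw [hBdur]
  cases hcase : (progresses.zip speeds).map (fun p => pyCeilDiv (100 - p.1) p.2) with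
  | nil =>
    exfalso
    rw [hcase] at hDlen
    simp only [List.length_nil] at hDlen
    exact hne (List.eq_nil_of_length_eq_zero hDlen.symm)
  | cons d rest =>
    have hsl : speeds.length = rest.length + 1 := by
      rw [← hDlen, hcase, List.length_cons]
    rw [hsl]
    rw [leadersB_eq_leadersT (rest.length + 1) (d :: rest) (le_of_eq (List.length_cons).symm)]
    have := mainM rest.length d rest le_rfl
    rw [List.length_cons] at this
    exact this
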